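-- pv_equiv track=rewrite | github.com/otavio0machado/cursor-bio-compulabxsimus | app.py | _find_patient_in_tokens
-- ===== SOURCE A (Python) =====
-- def _find_patient_in_tokens(tokens, candidate_patients):
--     if not candidate_patients:
--         return None, None
--     for patient_tokens in candidate_patients:
--         size = len(patient_tokens)
--         if size == 0 or size > len(tokens):
--             continue
--         for i in range(0, len(tokens) - size + 1):
--             if tokens[i : i + size] == patient_tokens:
--                 return " ".join(tokens[i : i + size]), i + size
--     return None, None
-- ===== SOURCE B (Python) =====
-- def _find_patient_in_tokens(tokens, candidate_patients):
--     # Build a positions index once: token -> list of indices (increasing).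
--     positions = {}
--     for i, tok in enumerate(tokens):
--         positions.setdefault(tok, []).append(i)
--     n = len(tokens)
--     for pat in candidate_patients:
--         m = len(pat)
--         if m == 0 or m > n:
--             continue
--         # Only try offsets where the first token already matches.
--         for i in positions.get(pat[0], []):
--             if i + m <= n and tokens[i + 1 : i + m] == pat[1:]:
--                 return " ".join(pat), i + m
--     return None, None
-- ===== Notes on version B (the rewrite author's own statement) =====
-- stated objective: faster
-- what changed: B builds a token->positions index once and, per patient, checks only the offsets where the patient's first token occurs (comparing the anchored remainder), instead of A's slice comparison at every offset of tokens.
import Mathlib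
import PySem

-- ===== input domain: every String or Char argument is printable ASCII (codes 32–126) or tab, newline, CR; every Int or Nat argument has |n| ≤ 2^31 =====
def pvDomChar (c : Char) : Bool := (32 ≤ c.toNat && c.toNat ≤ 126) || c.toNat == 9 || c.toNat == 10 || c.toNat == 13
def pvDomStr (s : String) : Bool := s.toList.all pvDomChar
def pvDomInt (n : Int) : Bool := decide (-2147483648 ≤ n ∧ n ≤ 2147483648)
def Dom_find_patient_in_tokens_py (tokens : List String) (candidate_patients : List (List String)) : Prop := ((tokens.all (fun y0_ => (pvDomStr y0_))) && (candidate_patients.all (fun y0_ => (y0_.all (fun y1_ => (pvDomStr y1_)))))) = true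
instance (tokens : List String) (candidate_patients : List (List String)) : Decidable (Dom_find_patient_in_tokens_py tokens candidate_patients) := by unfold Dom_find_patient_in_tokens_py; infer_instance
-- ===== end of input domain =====

-- B replaces A's slice comparison at every offset by a token→positions index built once,
-- so only offsets whose first token already matches the patient's first token are tried.

-- ===== PORT A =====
-- inner 'for i in range(...)' loop of A: first i with tokens[i:i+size] == patient_tokens
def pvAfind (tokens : List String) (pat : List String) : Option Int :=
  (PySem.List.pyRange 0 ((tokens.length : Int) - (pat.length : Int) + 1)).find?
    (fun i => PySem.List.slice tokens (some i) (some (i + (pat.length : Int))) == pat)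

-- outer 'for patient_tokens in candidate_patients' loop of A
def pvA (tokens : List String) : List (List String) → Option String × Option Int
  | [] => (none, none)
  | pat :: rest =>
    if pat.length = 0 ∨ tokens.length < pat.length then pvA tokens rest
    else
      match pvAfind tokens pat with
      | some i => (some (PySem.Str.join " " (PySem.List.slice tokens (some i) (some (i + (pat.length : Int))))),
                   some (i + (pat.length : Int)))
      | none => pvA tokens rest

def find_patient_in_tokens_py (tokens : List String) (candidate_patients : List (List String)) : Option String × Option Int :=
  if candidate_patients.isEmpty then (none, none) else pvA tokens candidate_patients

-- ===== PORT B =====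
-- B's index: positions.setdefault(tok, []).append(i) over enumerate(tokens)
def pvIndex (tokens : List String) : PySem.Dict String (List Int) :=
  (PySem.List.enumerate tokens).foldl (fun d p => d.modify p.2 [] (fun l => l ++ [p.1])) PySem.Dict.empty

-- inner 'for i in positions.get(pat[0], [])' loop of B; pat.headD "" is pat[0] (pat ≠ [] under the guard)
def pvBfind (tokens : List String) (pos : PySem.Dict String (List Int)) (pat : List String) : Option Int :=
  (pos.getD (pat.headD "") []).find?
    (fun i => decide (i + (pat.length : Int) ≤ (tokens.length : Int)) &&
      (PySem.List.slice tokens (some (i + 1)) (some (i + (pat.length : Int))) == PySem.List.slice pat (some 1) none))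

-- outer 'for pat in candidate_patients' loop of B
def pvB (tokens : List String) (pos : PySem.Dict String (List Int)) : List (List String) → Option String × Option Int
  | [] => (none, none)
  | pat :: rest =>
    if pat.length = 0 ∨ tokens.length < pat.length then pvB tokens pos rest
    else
      match pvBfind tokens pos pat with
      | some i => (some (PySem.Str.join " " pat), some (i + (pat.length : Int)))
      | none => pvB tokens pos rest

def find_patient_in_tokens_py_alt (tokens : List String) (candidate_patients : List (List String)) : Option String × Option Int :=
  pvB tokens (pvIndex tokens) candidate_patients

-- ===== PRECONDITION & SPEC =====
def Spec_find_patient_in_tokens_py (tokens : List String) (candidate_patients : List (List String)) (out : Option String × Option Int) : Prop := out = find_patient_in_tokens_py_alt tokens candidate_patients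
instance (tokens : List String) (candidate_patients : List (List String)) (out : Option String × Option Int) : Decidable (Spec_find_patient_in_tokens_py tokens candidate_patients out) := by unfold Spec_find_patient_in_tokens_py; infer_instance

-- ===== CLAIM (what is proved, stated in full; the proofs are below) =====
def Claim_equal_find_patient_in_tokens_py : Prop := ∀ (tokens : List String) (candidate_patients : List (List String)), Dom_find_patient_in_tokens_py tokens candidate_patients → Spec_find_patient_in_tokens_py tokens candidate_patients (find_patient_in_tokens_py tokens candidate_patients)

-- ===== LEMMAS AND PROOFS =====

-- B's index characterised: the positions stored under t are exactly the indices j with tokens[j] = t, in order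
theorem pvIndex_getD (tokens : List String) (t : String) :
    (pvIndex tokens).getD t [] =
      List.map (fun (j : Nat) => (j : Int)) ((List.range tokens.length).filter (fun j => tokens.getD j "" == t)) := by
  unfold pvIndex
  have hswap : (PySem.List.enumerate tokens).foldl
      (fun d p => d.modify p.2 [] (fun l => l ++ [p.1])) PySem.Dict.empty
      = ((PySem.List.enumerate tokens).map Prod.swap).foldl
        (fun d p => d.modify p.1 [] (fun l => l ++ [p.2])) PySem.Dict.empty := by
    rw [List.foldl_map]; rfl
  rw [hswap, PySem.Dict.getD_foldl_modify_append]
  rw [PySem.List.enumerate_eq_map_pyRange tokens ""]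
  have hlen : PySem.List.len tokens = ((tokens.length : Nat) : Int) := rfl
  rw [hlen, PySem.List.pyRange_zero_natCast]
  simp [List.map_map, List.filter_map, Function.comp_def, PySem.List.pyGetD_natCast,
    List.getD]

-- on a strictly increasing list, find? returns the minimum element satisfying the predicate
theorem pv_find_min {l : List Nat} {p : Nat → Bool} (h : l.Pairwise (· < ·)) {a : Nat}
    (ha : l.find? p = some a) : ∀ b ∈ l, p b = true → a ≤ b := by
  induction l with
  | nil => simp at ha
  | cons x t ih =>
    rw [List.pairwise_cons] at h
    cases hp : p x with
    | true =>
      rw [List.find?_cons_of_pos hp] at ha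
      cases ha
      intro b hb _
      rcases List.mem_cons.1 hb with rfl | hb
      · exact le_refl _
      · exact Nat.le_of_lt (h.1 b hb)
    | false =>
      rw [List.find?_cons_of_neg (by simp [hp])] at ha
      intro b hb hpb
      rcases List.mem_cons.1 hb with rfl | hb
      · rw [hp] at hpb; exact absurd hpb (by simp)
      · exact ih h.2 ha b hb hpb

theorem pv_find_eq_some {l : List Nat} {p : Nat → Bool} (h : l.Pairwise (· < ·)) {a : Nat}
    (ha : a ∈ l) (hpa : p a = true) (hmin : ∀ b ∈ l, p b = true → a ≤ b) : l.find? p = some a := by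
  induction l with
  | nil => simp at ha
  | cons x t ih =>
    rw [List.pairwise_cons] at h
    cases hp : p x with
    | true =>
      rw [List.find?_cons_of_pos hp]
      rcases List.mem_cons.1 ha with rfl | hat
      · rfl
      · have h1 := hmin x (List.mem_cons_self) hp
        have h2 := h.1 a hat
        omega
    | false =>
      rw [List.find?_cons_of_neg (by simp [hp])]
      rcases List.mem_cons.1 ha with rfl | hat
      · rw [hp] at hpa; exact absurd hpa (by simp)
      · exact ih h.2 hat (fun b hb hpb => hmin b (List.mem_cons_of_mem _ hb) hpb)

-- two find? scans over strictly increasing lists agree when 'in the list and satisfying' coincide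
theorem pv_find_congr {l₁ l₂ : List Nat} {p₁ p₂ : Nat → Bool}
    (h₁ : l₁.Pairwise (· < ·)) (h₂ : l₂.Pairwise (· < ·))
    (hiff : ∀ j, (j ∈ l₁ ∧ p₁ j = true) ↔ (j ∈ l₂ ∧ p₂ j = true)) :
    l₁.find? p₁ = l₂.find? p₂ := by
  cases e₁ : l₁.find? p₁ with
  | none =>
    cases e₂ : l₂.find? p₂ with
    | none => rfl
    | some b =>
      have hb := (hiff b).2 ⟨List.mem_of_find?_eq_some e₂, List.find?_some e₂⟩
      exact absurd hb.2 (by simpa using (List.find?_eq_none.1 e₁) b hb.1)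
  | some a =>
    have haa := (hiff a).1 ⟨List.mem_of_find?_eq_some e₁, List.find?_some e₁⟩
    refine (pv_find_eq_some h₂ haa.1 haa.2 ?_).symm
    intro b hb hpb
    have hb1 := (hiff b).2 ⟨hb, hpb⟩
    exact pv_find_min h₁ e₁ b hb1.1 hb1.2

-- a length-(k+1) window equals p0 :: pt iff its first token matches and the remaining window matches
theorem pv_window (xs : List String) (j : Nat) (p0 : String) (pt : List String) :
    ((xs.drop j).take (pt.length + 1) = p0 :: pt) ↔
      (j < xs.length ∧ j + (pt.length + 1) ≤ xs.length ∧ xs.getD j "" = p0 ∧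
        (xs.drop (j + 1)).take pt.length = pt) := by
  by_cases hj : j < xs.length
  · rw [List.drop_eq_getElem_cons hj, List.take_succ_cons]
    constructor
    · intro h
      obtain ⟨h0, ht⟩ := List.cons.inj h
      have hlen := congrArg List.length ht
      simp [List.length_take, List.length_drop] at hlen
      refine ⟨hj, by omega, by rw [List.getD_eq_getElem _ _ hj]; exact h0, ht⟩
    · rintro ⟨-, -, h0, ht⟩
      rw [List.getD_eq_getElem _ _ hj] at h0
      rw [h0, ht]
  · constructor
    · intro h
      rw [List.drop_eq_nil_of_le (by omega)] at h
      simp at h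
    · rintro ⟨h, -⟩; omega

-- the two inner scans agree for a nonempty patient that fits into tokens
theorem pv_inner (tokens : List String) (p0 : String) (pt : List String)
    (hm : pt.length + 1 ≤ tokens.length) :
    pvAfind tokens (p0 :: pt) = pvBfind tokens (pvIndex tokens) (p0 :: pt) := by
  unfold pvAfind pvBfind
  have hK : ((tokens.length : Int) - ((p0 :: pt).length : Int) + 1)
      = ((tokens.length - pt.length : Nat) : Int) := by
    simp only [List.length_cons]; push_cast; omega
  rw [hK, PySem.List.pyRange_zero_natCast, pvIndex_getD]
  rw [List.find?_map (f := fun k : Nat => (k:Int))]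
  rw [List.find?_map (f := fun k : Nat => (k:Int)) (l := (List.range tokens.length).filter (fun j => tokens.getD j "" == (p0 :: pt).headD ""))]
  refine congrArg (Option.map _) ?_
  apply pv_find_congr (List.pairwise_lt_range) ((List.pairwise_lt_range).filter _)
  intro j
  simp only [Function.comp_apply, List.mem_range, List.mem_filter, List.length_cons,
    List.headD_cons, beq_iff_eq, Bool.and_eq_true, decide_eq_true_eq]
  have c1 : ((j : Int) + ((pt.length + 1 : Nat) : Int)) = (((j + pt.length + 1 : Nat)) : Int) := by push_cast; omega
  have c2 : ((j : Int) + 1) = (((j + 1 : Nat)) : Int) := by push_cast; omega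
  rw [c1, c2, PySem.List.slice_natCast, PySem.List.slice_natCast, PySem.List.slice_from_one]
  have e1 : j + pt.length + 1 - j = pt.length + 1 := by omega
  have e2 : j + pt.length + 1 - (j + 1) = pt.length := by omega
  rw [e1, e2]
  simp only [List.tail_cons]
  rw [pv_window tokens j p0 pt]
  constructor
  · rintro ⟨hjK, hj, hlen, h0, ht⟩
    refine ⟨⟨hj, h0⟩, ?_, ht⟩
    push_cast
    omega
  · rintro ⟨⟨hj, h0⟩, hlen, ht⟩
    have hlen' : j + (pt.length + 1) ≤ tokens.length := by push_cast at hlen; omega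
    exact ⟨by omega, hj, hlen', h0, ht⟩

theorem pvA_eq_pvB (tokens : List String) :
    ∀ cps, pvA tokens cps = pvB tokens (pvIndex tokens) cps := by
  intro cps
  induction cps with
  | nil => rfl
  | cons pat rest ih =>
    simp only [pvA, pvB]
    by_cases hg : pat.length = 0 ∨ tokens.length < pat.length
    · rw [if_pos hg, if_pos hg]; exact ih
    · rw [if_neg hg, if_neg hg]
      push Not at hg
      obtain ⟨h0, hle⟩ := hg
      cases pat with
      | nil => simp at h0
      | cons p0 pt =>
        rw [← pv_inner tokens p0 pt (by simpa using hle)]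
        cases e : pvAfind tokens (p0 :: pt) with
        | none => exact ih
        | some i =>
          have hp := List.find?_some (p := fun i => PySem.List.slice tokens (some i) (some (i + ((p0 :: pt).length : Int))) == (p0 :: pt)) (by simpa [pvAfind] using e)
          rw [beq_iff_eq] at hp
          have hp' : PySem.List.slice tokens (some i) (some (i + ((pt.length : Int) + 1))) = p0 :: pt := by
            simpa using hp
          simp [hp']

-- ===== VERDICT (by name: the statement is the Claim_ definition above) =====
theorem find_patient_in_tokens_py_spec : Claim_equal_find_patient_in_tokens_py := by
  intro tokens cps _
  unfold Spec_find_patient_in_tokens_py find_patient_in_tokens_py find_patient_in_tokens_py_alt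
  cases cps with
  | nil => rfl
  | cons c cs => simpa using pvA_eq_pvB tokens (c :: cs)
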